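-- pv_equiv track=rewrite | github.com/Aasthaengg/IBMdataset | Python_codes/p03263/s827158100.py | row_mainte
-- ===== SOURCE A (Python) =====
-- def row_mainte(A,w):
--     output = []
--     for i in range(len(A)-1):
--         if A[i] % 2 != 0:
--             A[i] -= 1
--             A[i+1] += 1
--             output.append((i+1,w,i+2,w))
--     return (len(output),output)
-- ===== SOURCE B (Python) =====
-- def row_mainte(A, w):
--     # Closed form: an operation is recorded at index i iff A[0]+...+A[i] is odd
--     # (each operation leaves position i even, so the carried parity is exactly
--     # the prefix-sum parity).  B builds the prefix sums in one pass and then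
--     # filters by parity; it does not mutate A (A does; return value identical).
--     prefix = []
--     s = 0
--     for x in A[:len(A) - 1]:
--         s += x
--         prefix.append(s)
--     output = [(i + 1, w, i + 2, w) for i, s in enumerate(prefix) if s % 2 != 0]
--     return (len(output), output)
-- ===== Notes on version B (the rewrite author's own statement) =====
-- stated objective: alternative
-- what changed: B replaces A's in-place simulation (decrement A[i], increment A[i+1], append when the mutated cell is odd) by a closed-form characterisation: the operation at index i happens iff the prefix sum A[0]+...+A[i] is odd, so B builds the prefix sums in one read-only pass and filters by parity; B does not mutate the argument list (A does), the return value is identical.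
import Mathlib
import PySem

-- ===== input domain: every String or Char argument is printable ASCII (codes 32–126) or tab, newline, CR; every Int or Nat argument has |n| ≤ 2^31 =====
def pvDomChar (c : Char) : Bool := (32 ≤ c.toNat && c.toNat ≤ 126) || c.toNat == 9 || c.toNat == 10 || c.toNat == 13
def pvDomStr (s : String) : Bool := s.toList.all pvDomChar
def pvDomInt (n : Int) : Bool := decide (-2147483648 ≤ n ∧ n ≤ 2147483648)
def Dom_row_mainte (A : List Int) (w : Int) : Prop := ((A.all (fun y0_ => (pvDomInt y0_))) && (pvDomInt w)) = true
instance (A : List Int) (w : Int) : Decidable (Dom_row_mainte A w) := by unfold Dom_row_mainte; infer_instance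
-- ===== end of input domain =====

-- B replaces A's in-place simulation by the closed form "operation at i iff the prefix sum
-- A[0..i] is odd": one read-only prefix-sum pass, then a parity filter. A mutates its
-- argument list, B does not: the equivalence proved here is about the RETURN value only.

-- ===== PORT A =====
def row_mainte (A : List Int) (w : Int) : Int × (List (Int × Int × Int × Int)) :=
  let st := (PySem.List.pyRange 0 (PySem.List.len A - 1) 1).foldl
    (fun (st : List Int × List (Int × Int × Int × Int)) i =>
      if PySem.Int.mod (PySem.List.pyGetD st.1 i 0) 2 ≠ 0 then
        let A1 := PySem.List.pySetD st.1 i (PySem.List.pyGetD st.1 i 0 - 1)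
        let A2 := PySem.List.pySetD A1 (i + 1) (PySem.List.pyGetD A1 (i + 1) 0 + 1)
        (A2, st.2 ++ [(i + 1, w, i + 2, w)])
      else st)
    (A, ([] : List (Int × Int × Int × Int)))
  (PySem.List.len st.2, st.2)

-- ===== PORT B =====
def row_mainte_alt (A : List Int) (w : Int) : Int × (List (Int × Int × Int × Int)) :=
  let pref := ((PySem.List.slice A none (some (PySem.List.len A - 1))).foldl
    (fun (st : List Int × Int) x => (st.1 ++ [st.2 + x], st.2 + x))
    (([] : List Int), (0 : Int))).1
  let output := (PySem.List.enumerate pref 0).filterMap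
    (fun p => if PySem.Int.mod p.2 2 ≠ 0 then some (p.1 + 1, w, p.1 + 2, w) else none)
  (PySem.List.len output, output)

-- ===== PRECONDITION & SPEC =====
def Spec_row_mainte (A : List Int) (w : Int) (out : Int × (List (Int × Int × Int × Int))) : Prop := out = row_mainte_alt A w
instance (A : List Int) (w : Int) (out : Int × (List (Int × Int × Int × Int))) : Decidable (Spec_row_mainte A w out) := by unfold Spec_row_mainte; infer_instance

-- ===== CLAIM (what is proved, stated in full; the proofs are below) =====
def Claim_equal_row_mainte : Prop := ∀ (A : List Int) (w : Int), Dom_row_mainte A w → Spec_row_mainte A w (row_mainte A w)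

-- ===== LEMMAS AND PROOFS =====

-- proof-side name for A's loop body (definitionally the lambda in the port)
def pvStepA (w : Int) (st : List Int × List (Int × Int × Int × Int)) (i : Int) :
    List Int × List (Int × Int × Int × Int) :=
  if PySem.Int.mod (PySem.List.pyGetD st.1 i 0) 2 ≠ 0 then
    let A1 := PySem.List.pySetD st.1 i (PySem.List.pyGetD st.1 i 0 - 1)
    let A2 := PySem.List.pySetD A1 (i + 1) (PySem.List.pyGetD A1 (i + 1) 0 + 1)
    (A2, st.2 ++ [(i + 1, w, i + 2, w)])
  else st

-- the closed-form per-index emission B's filter realises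
def pvEmit (A : List Int) (w : Int) (k : Nat) : Option (Int × Int × Int × Int) :=
  if PySem.Int.mod ((A.take (k + 1)).sum) 2 ≠ 0 then some ((k : Int) + 1, w, (k : Int) + 2, w) else none

lemma rowA_eq (A : List Int) (w : Int) :
    row_mainte A w =
      (PySem.List.len ((PySem.List.pyRange 0 (PySem.List.len A - 1) 1).foldl (pvStepA w) (A, [])).2,
       ((PySem.List.pyRange 0 (PySem.List.len A - 1) 1).foldl (pvStepA w) (A, [])).2) := rfl

-- B's prefix-sum fold builds exactly the list of prefix sums
lemma pref_fold (xs : List Int) (acc : List Int) (s : Int) :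
    (xs.foldl (fun (st : List Int × Int) x => (st.1 ++ [st.2 + x], st.2 + x)) (acc, s)).1
      = acc ++ (List.range xs.length).map (fun k => s + (xs.take (k + 1)).sum) := by
  induction xs generalizing acc s with
  | nil => simp
  | cons x xs ih =>
      rw [List.foldl_cons, ih]
      simp only [List.length_cons, List.range_succ_eq_map, List.map_cons, List.map_map]
      simp [List.append_assoc, Function.comp]
      intro k _
      ring

-- enumerate of a mapped range, filtered: index k pairs with f k
lemma enum_filterMap {b : Type} (n : Nat) (f : Nat -> Int) (g : Int × Int -> Option b) :
    (PySem.List.enumerate ((List.range n).map f) 0).filterMap g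
      = (List.range n).filterMap (fun k => g (((k : Nat) : Int), f k)) := by
  induction n with
  | zero => simp [PySem.List.enumerate_nil]
  | succ n ih =>
      rw [List.range_succ, List.map_append, PySem.List.enumerate_append,
        List.filterMap_append, ih, List.filterMap_append]
      cases h : g (((n : Nat) : Int), f n) <;>
        simp [PySem.List.enumerate_cons, PySem.List.enumerate_nil, h]

-- B's output is the filterMap of pvEmit over range (len-1)
lemma rowB_eq (A : List Int) (w : Int) :
    row_mainte_alt A w =
      (PySem.List.len ((List.range (A.length - 1)).filterMap (pvEmit A w)),
       (List.range (A.length - 1)).filterMap (pvEmit A w)) := by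
  have hsl : PySem.List.slice A none (some (PySem.List.len A - 1)) = A.dropLast := by
    rcases A with - | ⟨a, As⟩
    · simp [PySem.List.slice]
    · have hb : (PySem.List.len (a :: As) - 1) = (((a :: As).length - 1 : Nat) : Int) := by
        simp [PySem.List.len_eq]
      rw [hb, PySem.List.slice_to_natCast, List.dropLast_eq_take]
  simp only [row_mainte_alt, hsl, pref_fold, List.nil_append, List.length_dropLast,
    enum_filterMap]
  have hcong : ∀ k ∈ List.range (A.length - 1),
      (if PySem.Int.mod (0 + (List.take (k + 1) A.dropLast).sum) 2 ≠ 0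
        then some (((k : Nat) : Int) + 1, w, ((k : Nat) : Int) + 2, w) else none) = pvEmit A w k := by
    intro k hk
    have hk' : k < A.length - 1 := List.mem_range.mp hk
    have htake : A.dropLast.take (k + 1) = A.take (k + 1) := by
      rw [List.dropLast_eq_take, List.take_take]
      congr 1
      omega
    simp [pvEmit, htake]
  rw [List.filterMap_congr hcong]

-- parity absorbs an already-reduced carry
lemma mod2_absorb (a b : Int) : PySem.Int.mod (a + PySem.Int.mod b 2) 2 = PySem.Int.mod (a + b) 2 := by
  simp only [PySem.Int.mod_eq_emod_of_pos (by norm_num : (0:Int) < 2)]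
  omega

-- loop invariant: after m iterations A's loop has produced exactly the closed-form output
-- on indices < m; A's mutated list keeps its length, agrees with the original beyond index m,
-- and at index m carries exactly the parity of the prefix sum A[0..m-1].
lemma rm_inv (A : List Int) (w : Int) (m : Nat) (hm : m < A.length) :
    (((PySem.List.pyRange 0 (m : Int) 1).foldl (pvStepA w) (A, [])).2
       = (List.range m).filterMap (pvEmit A w))
    ∧ (((PySem.List.pyRange 0 (m : Int) 1).foldl (pvStepA w) (A, [])).1.length = A.length)
    ∧ (∀ j : Nat, m ≤ j →
        (((PySem.List.pyRange 0 (m : Int) 1).foldl (pvStepA w) (A, [])).1.getD j 0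
          = A.getD j 0 + (if j = m then PySem.Int.mod ((A.take m).sum) 2 else 0))) := by
  induction m with
  | zero =>
      simp [PySem.Int.mod]
  | succ m ih =>
      have hm' : m < A.length := Nat.lt_of_succ_lt hm
      obtain ⟨hout, hlen, hidx⟩ := ih hm'
      set sA := ((PySem.List.pyRange 0 (m : Int) 1).foldl (pvStepA w) (A, [])) with hsA
      have hrange : PySem.List.pyRange 0 ((m : Nat) + 1 : Int) 1
          = PySem.List.pyRange 0 (m : Int) 1 ++ [(m : Int)] :=
        PySem.List.pyRange_one_succ_right (by exact_mod_cast Nat.zero_le m)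
      have hcast : (((m + 1 : Nat) : Int)) = ((m : Nat) : Int) + 1 := by push_cast; ring
      rw [hcast, hrange, List.foldl_append, ← hsA]
      simp only [List.foldl_cons, List.foldl_nil]
      have hAm : PySem.List.pyGetD sA.1 (m : Int) 0
          = A.getD m 0 + PySem.Int.mod ((A.take m).sum) 2 := by
        have := hidx m (le_refl m)
        simpa using this
      have hsum : (A.take (m + 1)).sum = (A.take m).sum + A.getD m 0 := by
        rw [List.sum_take_succ _ _ hm', List.getD_eq_getElem _ _ hm']
      have hS : PySem.Int.mod (A.getD m 0 + PySem.Int.mod ((A.take m).sum) 2) 2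
          = PySem.Int.mod ((A.take (m + 1)).sum) 2 := by
        rw [mod2_absorb, hsum]
        ring_nf
      unfold pvStepA
      rw [hAm]
      have hcast2 : ((m : Nat) : Int) + 1 = (((m + 1 : Nat)) : Int) := by push_cast; ring
      by_cases hc : PySem.Int.mod ((A.take (m + 1)).sum) 2 ≠ 0
      · rw [if_pos (by rw [hS]; exact hc)]
        have hone : PySem.Int.mod ((A.take (m + 1)).sum) 2 = 1 := by
          have h1 := PySem.Int.mod_nonneg ((A.take (m + 1)).sum) (by norm_num : (0:Int) < 2)
          have h2 := PySem.Int.mod_lt ((A.take (m + 1)).sum) (by norm_num : (0:Int) < 2)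
          omega
        rw [hcast2]
        simp only [PySem.List.pySetD_natCast, PySem.List.pyGetD_natCast]
        refine ⟨?_, by simp [hlen], ?_⟩
        · rw [hout, List.range_succ, List.filterMap_append]
          have hone' : (A.take (m + 1)).sum % 2 = 1 := by
            rw [← PySem.Int.mod_eq_emod_of_pos (by norm_num : (0:Int) < 2)]
            exact hone
          simp [pvEmit, hone']
        · intro j hj
          have h2 : sA.1.getD (m + 1) 0 = A.getD (m + 1) 0 := by
            have := hidx (m + 1) (Nat.le_succ m)
            simpa using this
          by_cases hje : j = m + 1
          · subst hje
            have hlt : m + 1 < sA.1.length := by omega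
            rw [if_pos rfl, hone]
            simp only [List.getD_eq_getElem?_getD] at h2 ⊢
            simp [hlt]
            simpa [List.getElem?_eq_getElem hlt] using h2
          · have h := hidx j (by omega)
            rw [if_neg (by omega : ¬ j = m), add_zero] at h
            have hne1 : m + 1 ≠ j := by omega
            have hne2 : m ≠ j := by omega
            simp only [List.getD_eq_getElem?_getD] at h ⊢
            simp [hne1, hne2, hje, h]
      · rw [if_neg (by rw [hS]; exact hc)]
        simp only [ne_eq, not_not] at hc
        refine ⟨?_, hlen, ?_⟩
        · rw [hout, List.range_succ, List.filterMap_append]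
          have hnone : pvEmit A w m = none := by
            have hdvd : (2 : Int) ∣ (A.take (m + 1)).sum :=
              (PySem.Int.mod_eq_zero_iff_dvd _ _).mp hc
            simp [pvEmit, hdvd]
          simp [hnone]
        · intro j hj
          have h := hidx j (by omega)
          rw [if_neg (by omega : ¬ j = m), add_zero] at h
          by_cases hje : j = m + 1
          · subst hje
            rw [if_pos rfl, hc, add_zero, h]
          · rw [if_neg hje, add_zero, h]

-- ===== VERDICT (by name: the statement is the Claim_ definition above) =====
theorem row_mainte_spec : Claim_equal_row_mainte := by
  intro A w _
  show row_mainte A w = row_mainte_alt A w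
  by_cases h0 : A.length = 0
  · have : (PySem.List.len A - 1 : Int) = -1 := by simp [h0]
    rw [rowA_eq, rowB_eq, this, PySem.List.pyRange_one_eq_nil (by norm_num)]
    simp [h0]
  · have hcast : (PySem.List.len A - 1 : Int) = ((A.length - 1 : Nat) : Int) := by
      simp [PySem.List.len_eq]; omega
    obtain ⟨hout, -, -⟩ := rm_inv A w (A.length - 1) (by omega)
    rw [rowA_eq, rowB_eq, hcast, hout]
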